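-- pv_equiv track=rewrite | github.com/REED-MG/obsidian-to-mem | mem_phase2_map.py | build_title_index
-- ===== SOURCE A (Python) =====
-- from typing import Dict, List, Optional
--
-- def normalise_title(title: str) -> str:
--     return title.strip().lower()
--
-- def build_title_index(api_notes: List[dict]) -> Dict[str, List[str]]:
--     """
--     Map lowercased title -> list of Mem IDs that have that title.
--     """
--     idx: Dict[str, List[str]] = {}
--     for n in api_notes:
--         title = (n.get("title") or "").strip()
--         mem_id = n["id"]
--         key = normalise_title(title)
--         idx.setdefault(key, []).append(mem_id)
--     return idx
-- ===== SOURCE B (Python) =====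
-- from typing import Dict, List
--
-- def build_title_index(api_notes: List[dict]) -> Dict[str, List[str]]:
--     """
--     Map lowercased title -> list of Mem IDs that have that title.
--     """
--     pairs = [((n.get("title") or "").strip().lower(), n["id"]) for n in api_notes]
--     keys = list(dict.fromkeys(k for k, _ in pairs))
--     return {k: [i for kk, i in pairs if kk == k] for k in keys}
-- ===== Notes on version B (the rewrite author's own statement) =====
-- stated objective: alternative
-- what changed: Replaces the incremental dict-of-lists (setdefault+append per note) with a three-stage pipeline: precompute (key, id) pairs, dedup the keys in first-occurrence order, then build each group by a per-key scan of the pairs.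
import Mathlib
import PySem

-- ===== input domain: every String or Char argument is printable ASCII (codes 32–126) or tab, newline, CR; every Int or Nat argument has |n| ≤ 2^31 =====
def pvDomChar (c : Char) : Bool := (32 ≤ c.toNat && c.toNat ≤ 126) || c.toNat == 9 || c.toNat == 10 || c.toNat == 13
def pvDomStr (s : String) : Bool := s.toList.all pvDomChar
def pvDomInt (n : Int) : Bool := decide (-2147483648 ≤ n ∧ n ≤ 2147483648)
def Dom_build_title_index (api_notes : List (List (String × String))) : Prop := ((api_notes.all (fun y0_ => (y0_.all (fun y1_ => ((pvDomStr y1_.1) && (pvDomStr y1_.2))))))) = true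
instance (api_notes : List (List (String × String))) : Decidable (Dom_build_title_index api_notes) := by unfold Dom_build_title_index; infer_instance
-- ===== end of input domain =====

-- B replaces A's incremental setdefault/append dict with a pipeline: (key, id) pairs, ordered key dedup, per-key scan; same result, no speed claim.
-- n["id"] raises KeyError on a note without "id": those inputs are excluded by Pre_ below, so the port may read it with a default.

-- ===== PORT A =====
def build_title_index (api_notes : List (List (String × String))) : List (String × List String) :=
  (api_notes.foldl (fun idx n =>
      -- title = (n.get("title") or "").strip()  ('or ""' collapses both a missing key and an empty value to "")
      let title := PySem.Str.strip (PySem.Dict.getD (PySem.Dict.mk n) "title" "")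
      -- mem_id = n["id"]  (total read; Pre_ guarantees the key is present, so the default is never used)
      let mem_id := ((PySem.Dict.mk n).get? "id").getD ""
      -- key = normalise_title(title) = title.strip().lower()
      let key := PySem.Str.lower (PySem.Str.strip title)
      -- idx.setdefault(key, []).append(mem_id)  = idx[key] = idx.get(key, []) + [mem_id]  (exact)
      idx.modify key [] (· ++ [mem_id]))
    PySem.Dict.empty).items

-- ===== PORT B =====
-- B-side helpers
def pvKeyB (n : List (String × String)) : String :=
  PySem.Str.lower (PySem.Str.strip (PySem.Dict.getD (PySem.Dict.mk n) "title" ""))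
def pvIdB (n : List (String × String)) : String :=
  ((PySem.Dict.mk n).get? "id").getD ""   -- n["id"]; total under Pre_ as in port A

def build_title_index_alt (api_notes : List (List (String × String))) : List (String × List String) :=
  let pairs := api_notes.map (fun n => (pvKeyB n, pvIdB n))
  let keys := PySem.List.dedup (pairs.map (·.1))   -- list(dict.fromkeys(...))
  keys.map (fun k => (k, (pairs.filter (fun p => p.1 == k)).map (·.2)))

-- ===== PRECONDITION & SPEC =====
-- Pre_ excludes exactly the notes without an "id" key, on which Python A (and B) raise KeyError.
def Pre_build_title_index (api_notes : List (List (String × String))) : Prop :=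
  ∀ n ∈ api_notes, "id" ∈ n.map (·.1)
instance (api_notes : List (List (String × String))) : Decidable (Pre_build_title_index api_notes) := by unfold Pre_build_title_index; infer_instance

def pvWitness_build_title_index : (List (List (String × String))) :=
  [[("id", "1"), ("title", "  Foo ")], [("id", "2"), ("title", "foo")], [("id", "3")]]

def Spec_build_title_index (api_notes : List (List (String × String))) (out : List (String × List String)) : Prop := out = build_title_index_alt api_notes
instance (api_notes : List (List (String × String))) (out : List (String × List String)) : Decidable (Spec_build_title_index api_notes out) := by unfold Spec_build_title_index; infer_instance

-- ===== CLAIM (what is proved, stated in full; the proofs are below) =====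
def Claim_equal_build_title_index : Prop := ∀ (api_notes : List (List (String × String))), Dom_build_title_index api_notes → Pre_build_title_index api_notes → Spec_build_title_index api_notes (build_title_index api_notes)

-- ===== LEMMAS AND PROOFS =====

theorem pv_dw_idem {α : Type} (p : α → Bool) (l : List α) :
    List.dropWhile p (List.dropWhile p l) = List.dropWhile p l := by
  induction l with
  | nil => rfl
  | cons c t ih =>
    by_cases hc : p c = true
    · simp [hc, ih]
    · simp at hc; simp [hc]

theorem pv_lstrip_rstrip (x : List Char) :
    PySem.Chars.lstrip (PySem.Chars.rstrip (PySem.Chars.lstrip x)) = PySem.Chars.rstrip (PySem.Chars.lstrip x) := by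
  simp only [PySem.Chars.lstrip, PySem.Chars.rstrip]
  obtain ⟨t, ht⟩ := (List.dropWhile_suffix (l := (List.dropWhile PySem.Chars.isspace x).reverse) PySem.Chars.isspace)
  have hpre : (List.dropWhile PySem.Chars.isspace (List.dropWhile PySem.Chars.isspace x).reverse).reverse ++ t.reverse
      = List.dropWhile PySem.Chars.isspace x := by
    rw [← List.reverse_append, ht, List.reverse_reverse]
  cases hy : (List.dropWhile PySem.Chars.isspace (List.dropWhile PySem.Chars.isspace x).reverse).reverse with
  | nil => rfl
  | cons c cs =>
    rw [hy] at hpre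
    have hd : List.dropWhile PySem.Chars.isspace x = c :: (cs ++ t.reverse) := by rw [← hpre]; simp
    have hidem := pv_dw_idem PySem.Chars.isspace x
    rw [hd] at hidem
    by_cases hc : PySem.Chars.isspace c = true
    · exfalso
      have := congrArg List.length hidem
      simp [hc] at this
      have h2 := List.length_dropWhile_le PySem.Chars.isspace (cs ++ t.reverse)
      have h3 : (cs ++ t.reverse).length = cs.length + t.length := by simp
      omega
    · simp at hc
      simp [hc]

theorem pv_strip_idem_chars (x : List Char) :
    PySem.Chars.strip (PySem.Chars.strip x) = PySem.Chars.strip x := by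
  simp only [PySem.Chars.strip]
  rw [pv_lstrip_rstrip]
  simp only [PySem.Chars.rstrip, PySem.Chars.lstrip]
  rw [List.reverse_reverse, pv_dw_idem]

theorem pv_strip_idem (s : String) :
    PySem.Str.strip (PySem.Str.strip s) = PySem.Str.strip s := by
  simp [PySem.Str.strip, pv_strip_idem_chars]

-- the fold over notes is the fold over the precomputed (key, id) pairs
theorem pv_fold_pairs (l : List (List (String × String))) (d : PySem.Dict String (List String)) :
    List.foldl (fun (idx : PySem.Dict String (List String)) n => idx.modify (pvKeyB n) [] (· ++ [pvIdB n])) d l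
      = List.foldl (fun (idx : PySem.Dict String (List String)) p => idx.modify p.1 [] (· ++ [p.2])) d
          (l.map (fun n => (pvKeyB n, pvIdB n))) := by
  induction l generalizing d with
  | nil => rfl
  | cons n t ih => simp [ih]

-- A's step depends on a note only through (pvKeyB n, pvIdB n)
theorem pv_stepA_eq (idx : PySem.Dict String (List String)) (n : List (String × String)) :
    (let title := PySem.Str.strip (PySem.Dict.getD (PySem.Dict.mk n) "title" "")
     let mem_id := ((PySem.Dict.mk n).get? "id").getD ""
     let key := PySem.Str.lower (PySem.Str.strip title)
     idx.modify key [] (· ++ [mem_id]))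
    = idx.modify (pvKeyB n) [] (· ++ [pvIdB n]) := by
  simp only [pvKeyB, pvIdB, pv_strip_idem]

-- ===== VERDICT (by name: the statement is the Claim_ definition above) =====
theorem build_title_index_spec : Claim_equal_build_title_index := by
  intro api_notes _ _
  unfold Spec_build_title_index build_title_index build_title_index_alt
  simp only [pv_stepA_eq]
  rw [pv_fold_pairs]
  set pairs := api_notes.map (fun n => (pvKeyB n, pvIdB n)) with hpairs
  have hnd : (pairs.foldl (fun (d : PySem.Dict String (List String)) p => d.modify p.1 [] (· ++ [p.2])) PySem.Dict.empty).keys.Nodup := by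
    exact PySem.Dict.nodup_keys_foldl_modify_key pairs Prod.fst [] (fun _ p v => v ++ [p.2]) PySem.Dict.empty (by simp)
  rw [PySem.Dict.items_eq_map_keys _ hnd []]
  have hkeys : (pairs.foldl (fun (d : PySem.Dict String (List String)) p => d.modify p.1 [] (· ++ [p.2])) PySem.Dict.empty).keys
      = PySem.List.dedup (pairs.map (·.1)) := by
    rw [PySem.Dict.keys_foldl_modify_key]
    simp [PySem.Set.update_nil_left]
  rw [hkeys]
  apply List.map_congr_left
  intro k _
  rw [PySem.Dict.getD_foldl_modify_append]
  simp
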